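-- pv_equiv track=rewrite | github.com/chrisBioInf/PECODER | Visualizations/plot_domain_interactions.py | get_ab_values
-- ===== SOURCE A (Python) =====
-- def get_ab_values(architectures: list, residues: list) -> tuple:
--     a = 0
--     b = 0
--     a_plus_b = 0
--     a_b = 0
--     other = 0
--
--     for i in range(0, len(architectures)):
--         if (architectures[i] == 'a'):
--             a += residues[i]
--         elif (architectures[i] == 'b'):
--             b += residues[i]
--         elif (architectures[i] == 'a+b'):
--             a_plus_b += residues[i]
--         elif (architectures[i] == 'a/b'):
--             a_b += residues[i]
--         else:
--             other += residues[i]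
--
--     return (a, b, a_plus_b, a_b, other)
-- ===== SOURCE B (Python) =====
-- def get_ab_values(architectures: list, residues: list) -> tuple:
--     n = len(architectures)
--     a = sum(residues[i] for i in range(n) if architectures[i] == 'a')
--     b = sum(residues[i] for i in range(n) if architectures[i] == 'b')
--     a_plus_b = sum(residues[i] for i in range(n) if architectures[i] == 'a+b')
--     a_b = sum(residues[i] for i in range(n) if architectures[i] == 'a/b')
--     other = sum(residues[i] for i in range(n)
--                 if architectures[i] not in ('a', 'b', 'a+b', 'a/b'))
--     return (a, b, a_plus_b, a_b, other)
-- ===== Notes on version B (the rewrite author's own statement) =====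
-- stated objective: alternative
-- what changed: Replaces the single loop threading five accumulators with five independent filtered sums, one scan per category.
import Mathlib
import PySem

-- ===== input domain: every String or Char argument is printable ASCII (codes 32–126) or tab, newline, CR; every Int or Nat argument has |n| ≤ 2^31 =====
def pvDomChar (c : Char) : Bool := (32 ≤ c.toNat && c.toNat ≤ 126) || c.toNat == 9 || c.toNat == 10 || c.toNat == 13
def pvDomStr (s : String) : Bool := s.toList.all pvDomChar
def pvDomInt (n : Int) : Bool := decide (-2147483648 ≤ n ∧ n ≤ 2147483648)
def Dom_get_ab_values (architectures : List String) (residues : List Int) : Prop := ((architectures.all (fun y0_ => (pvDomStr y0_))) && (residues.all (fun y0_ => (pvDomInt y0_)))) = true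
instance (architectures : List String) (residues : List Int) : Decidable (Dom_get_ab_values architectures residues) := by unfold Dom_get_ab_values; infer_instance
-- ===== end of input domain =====

-- B replaces A's single loop over five accumulators by five independent filtered sums
-- (one scan per architecture category); same cost, different decomposition.

-- ===== PORT A =====
-- one iteration of A's for-loop: dispatch architectures[i] and add residues[i] to the matching accumulator
def pvStepA (architectures : List String) (residues : List Int)
    (s : Int × Int × Int × Int × Int) (i : Int) : Int × Int × Int × Int × Int :=
  let x := PySem.List.pyGetD architectures i ""   -- in range for every loop index
  let r := PySem.List.pyGetD residues i 0         -- in range under Pre_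
  if x == "a" then (s.1 + r, s.2.1, s.2.2.1, s.2.2.2.1, s.2.2.2.2)
  else if x == "b" then (s.1, s.2.1 + r, s.2.2.1, s.2.2.2.1, s.2.2.2.2)
  else if x == "a+b" then (s.1, s.2.1, s.2.2.1 + r, s.2.2.2.1, s.2.2.2.2)
  else if x == "a/b" then (s.1, s.2.1, s.2.2.1, s.2.2.2.1 + r, s.2.2.2.2)
  else (s.1, s.2.1, s.2.2.1, s.2.2.2.1, s.2.2.2.2 + r)

def get_ab_values (architectures : List String) (residues : List Int) : Int × Int × Int × Int × Int :=
  (PySem.List.pyRange 0 (architectures.length : Int) 1).foldl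
    (pvStepA architectures residues) (0, 0, 0, 0, 0)

-- ===== PORT B =====
-- sum(residues[i] for i in <l> if p(architectures[i]))
def pvCatSumL (architectures : List String) (residues : List Int)
    (p : String → Bool) (l : List Int) : Int :=
  ((l.filter (fun i => p (PySem.List.pyGetD architectures i ""))).map
    (fun i => PySem.List.pyGetD residues i 0)).sum

def get_ab_values_alt (architectures : List String) (residues : List Int) : Int × Int × Int × Int × Int :=
  let idx := PySem.List.pyRange 0 (architectures.length : Int) 1
  ( pvCatSumL architectures residues (fun x => x == "a") idx
  , pvCatSumL architectures residues (fun x => x == "b") idx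
  , pvCatSumL architectures residues (fun x => x == "a+b") idx
  , pvCatSumL architectures residues (fun x => x == "a/b") idx
  , pvCatSumL architectures residues (fun x => !(["a", "b", "a+b", "a/b"].contains x)) idx )

-- ===== PRECONDITION & SPEC =====
-- A (and B) raise IndexError when residues is shorter than architectures; exactly those inputs are excluded.
def Pre_get_ab_values (architectures : List String) (residues : List Int) : Prop :=
  architectures.length ≤ residues.length
instance (architectures : List String) (residues : List Int) : Decidable (Pre_get_ab_values architectures residues) := by unfold Pre_get_ab_values; infer_instance

def pvWitness_get_ab_values : List String × List Int :=
  (["a", "b", "a+b", "a/b", "x"], [1, 2, 3, 4, 5])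

def Spec_get_ab_values (architectures : List String) (residues : List Int) (out : Int × Int × Int × Int × Int) : Prop := out = get_ab_values_alt architectures residues
instance (architectures : List String) (residues : List Int) (out : Int × Int × Int × Int × Int) : Decidable (Spec_get_ab_values architectures residues out) := by unfold Spec_get_ab_values; infer_instance

-- ===== CLAIM (what is proved, stated in full; the proofs are below) =====
def Claim_equal_get_ab_values : Prop := ∀ (architectures : List String) (residues : List Int), Dom_get_ab_values architectures residues → Pre_get_ab_values architectures residues → Spec_get_ab_values architectures residues (get_ab_values architectures residues)

-- ===== LEMMAS AND PROOFS =====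

-- A's loop over any index list computes, in each component, B's filtered sum over that list.
lemma pvLoop_eq (architectures : List String) (residues : List Int) :
    ∀ (l : List Int) (a b c d o : Int),
      l.foldl (pvStepA architectures residues) (a, b, c, d, o) =
        ( a + pvCatSumL architectures residues (fun x => x == "a") l
        , b + pvCatSumL architectures residues (fun x => x == "b") l
        , c + pvCatSumL architectures residues (fun x => x == "a+b") l
        , d + pvCatSumL architectures residues (fun x => x == "a/b") l
        , o + pvCatSumL architectures residues (fun x => !(["a", "b", "a+b", "a/b"].contains x)) l ) := by
  intro l
  induction l with
  | nil => intro a b c d o; simp [pvCatSumL]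
  | cons i l ih =>
    intro a b c d o
    simp only [List.foldl_cons]
    by_cases h1 : PySem.List.pyGetD architectures i "" = "a"
    · simp [pvStepA, h1, ih, pvCatSumL]; ring
    · by_cases h2 : PySem.List.pyGetD architectures i "" = "b"
      · simp [pvStepA, h2, ih, pvCatSumL]; ring
      · by_cases h3 : PySem.List.pyGetD architectures i "" = "a+b"
        · simp [pvStepA, h3, ih, pvCatSumL]; ring
        · by_cases h4 : PySem.List.pyGetD architectures i "" = "a/b"
          · simp [pvStepA, h4, ih, pvCatSumL]; ring
          · simp [pvStepA, h1, h2, h3, h4, ih, pvCatSumL]; ring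

-- ===== VERDICT (by name: the statement is the Claim_ definition above) =====
theorem get_ab_values_spec : Claim_equal_get_ab_values := by
  intro architectures residues _ _
  unfold Spec_get_ab_values get_ab_values get_ab_values_alt
  rw [pvLoop_eq]
  simp
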